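-- pv_equiv track=rewrite | github.com/yerbolat-bek/Web-Dev | lab7/task1/codingbat/list2/2.py | sum13
-- ===== SOURCE A (Python) =====
-- def sum13(nums):
--     if not nums:
--         return 0
--
--     total = 0
--     for i in range(len(nums)):
--         if nums[i] == 13:
--             continue
--
--         if i > 0 and nums[i-1] == 13:
--             continue
--
--         total += nums[i]
--
--     return total
-- ===== SOURCE B (Python) =====
-- def sum13(nums):
--     wiped = 13 * nums.count(13) + sum(y for x, y in zip(nums, nums[1:]) if x == 13 and y != 13)
--     return sum(nums) - wiped
-- ===== Notes on version B (the rewrite author's own statement) =====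
-- stated objective: alternative
-- what changed: Instead of A's masked index loop that skips 13s and look-back successors while accumulating, B takes the full sum of the list and subtracts the wiped elements: 13 times the count of 13s plus the sum of non-13 elements that follow a 13, found by zipping the list with its tail.
import Mathlib
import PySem

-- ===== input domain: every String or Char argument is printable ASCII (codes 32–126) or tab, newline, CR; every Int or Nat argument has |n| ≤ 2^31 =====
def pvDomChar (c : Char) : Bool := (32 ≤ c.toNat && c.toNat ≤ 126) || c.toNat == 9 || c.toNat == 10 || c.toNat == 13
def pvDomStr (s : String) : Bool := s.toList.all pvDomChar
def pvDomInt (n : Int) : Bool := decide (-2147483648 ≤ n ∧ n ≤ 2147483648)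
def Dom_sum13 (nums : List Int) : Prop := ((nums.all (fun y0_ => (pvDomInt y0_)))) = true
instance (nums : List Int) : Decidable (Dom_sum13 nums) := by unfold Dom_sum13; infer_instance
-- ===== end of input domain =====

-- B computes the full sum and subtracts the wiped-out elements (the 13s, counted, plus each
-- non-13 successor of a 13 found by zipping adjacent pairs) instead of A's masked index loop.

-- ===== PORT A =====
def sum13 (nums : List Int) : Int :=
  if nums = [] then 0
  else
    (PySem.List.pyRange 0 (nums.length : Int) 1).foldl (fun total i =>
      if PySem.List.pyGetD nums i 0 = 13 then total
      else if 0 < i ∧ PySem.List.pyGetD nums (i - 1) 0 = 13 then total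
      else total + PySem.List.pyGetD nums i 0) 0

-- ===== PORT B =====
def sum13_alt (nums : List Int) : Int :=
  let wiped : Int := 13 * (PySem.List.count nums 13 : Int) +
    (nums.zip (PySem.List.slice nums (some 1) none)).foldl
      (fun acc p => if p.1 = 13 ∧ p.2 ≠ 13 then acc + p.2 else acc) 0
  nums.sum - wiped

-- ===== PRECONDITION & SPEC =====
def Spec_sum13 (nums : List Int) (out : Int) : Prop := out = sum13_alt nums
instance (nums : List Int) (out : Int) : Decidable (Spec_sum13 nums out) := by unfold Spec_sum13; infer_instance

-- ===== CLAIM (what is proved, stated in full; the proofs are below) =====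
def Claim_equal_sum13 : Prop := ∀ (nums : List Int), Dom_sum13 nums → Spec_sum13 nums (sum13 nums)

-- ===== LEMMAS AND PROOFS =====

/-- A's loop body over a fixed list. -/
def aBody (xs : List Int) (total i : Int) : Int :=
  if PySem.List.pyGetD xs i 0 = 13 then total
  else if 0 < i ∧ PySem.List.pyGetD xs (i - 1) 0 = 13 then total
  else total + PySem.List.pyGetD xs i 0

/-- B's body for the zip fold. -/
def bStep (acc : Int) (p : Int × Int) : Int :=
  if p.1 = 13 ∧ p.2 ≠ 13 then acc + p.2 else acc

lemma pyGetD_append_left (ys : List Int) (x : Int) (i : Int)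
    (h0 : 0 ≤ i) (h1 : i < (ys.length : Int)) :
    PySem.List.pyGetD (ys ++ [x]) i 0 = PySem.List.pyGetD ys i 0 := by
  rw [PySem.List.pyGetD_eq_getElem (ys ++ [x]) 0 h0 (by simp; omega),
      PySem.List.pyGetD_eq_getElem ys 0 h0 h1]
  rw [List.getElem_append_left (by omega)]

lemma pyGetD_append_last (ys : List Int) (x : Int) :
    PySem.List.pyGetD (ys ++ [x]) (ys.length : Int) 0 = x := by
  rw [PySem.List.pyGetD_eq_getElem (ys ++ [x]) 0 (by positivity) (by simp)]
  simp

/-- `zip` of a list with its own tail, after appending one element. -/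
lemma zip_tail_append (ys : List Int) (x : Int) (h : ys ≠ []) :
    (ys ++ [x]).zip ((ys ++ [x]).tail) = ys.zip ys.tail ++ [(ys.getLast h, x)] := by
  induction ys with
  | nil => exact absurd rfl h
  | cons a t ih =>
    cases t with
    | nil => simp
    | cons b t' =>
      have := ih (by simp)
      simp only [List.cons_append, List.tail_cons, List.zip_cons_cons] at this ⊢
      rw [this]
      simp [List.getLast]

/-- Core invariant: A's index fold computes full sum minus 13s minus successors of 13s. -/
lemma key (xs : List Int) :
    (PySem.List.pyRange 0 (xs.length : Int) 1).foldl (aBody xs) 0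
      = xs.sum - (13 * (xs.count 13 : Int) + (xs.zip xs.tail).foldl bStep 0) := by
  induction xs using List.reverseRecOn with
  | nil => simp [PySem.List.pyRange_one_eq_nil]
  | append_singleton ys x ih =>
    have hlen : ((ys ++ [x]).length : Int) = (ys.length : Int) + 1 := by simp
    have hsplit : PySem.List.pyRange 0 ((ys ++ [x]).length : Int) 1
        = PySem.List.pyRange 0 (ys.length : Int) 1 ++ [(ys.length : Int)] := by
      rw [hlen, PySem.List.pyRange_one_succ_right (by positivity)]
    have hcongr : (PySem.List.pyRange 0 (ys.length : Int) 1).foldl (aBody (ys ++ [x])) 0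
        = (PySem.List.pyRange 0 (ys.length : Int) 1).foldl (aBody ys) 0 := by
      apply PySem.List.foldl_congr_mem
      intro acc i hi
      rw [PySem.List.mem_pyRange_one] at hi
      unfold aBody
      rw [pyGetD_append_left ys x i hi.1 hi.2]
      by_cases hpos : 0 < i
      · rw [pyGetD_append_left ys x (i - 1) (by omega) (by omega)]
      · simp [hpos]
    have hcount : (((ys ++ [x]).count 13 : Nat) : Int)
        = (ys.count 13 : Int) + (if x = 13 then 1 else 0) := by
      rw [List.count_append]
      by_cases hx : x = 13 <;> simp [hx]
    rw [hsplit, List.foldl_append, hcongr, ih]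
    simp only [List.foldl_cons, List.foldl_nil]
    unfold aBody
    rw [pyGetD_append_last, hcount]
    rcases List.eq_nil_or_concat' ys with hnil | ⟨zs, z, rfl⟩
    · subst hnil
      by_cases hx : x = 13 <;> simp [hx]
    · have hne : zs ++ [z] ≠ ([] : List Int) := by simp
      have hposn : (0 : Int) < ((zs ++ [z]).length : Int) := by simp
      have hzip : ((zs ++ [z]) ++ [x]).zip (((zs ++ [z]) ++ [x]).tail)
          = (zs ++ [z]).zip (zs ++ [z]).tail ++ [(z, x)] := by
        rw [zip_tail_append (zs ++ [z]) x hne]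
        simp
      have hlast : PySem.List.pyGetD ((zs ++ [z]) ++ [x]) (((zs ++ [z]).length : Int) - 1) 0
          = z := by
        rw [pyGetD_append_left _ x _ (by simp) (by omega)]
        have : ((zs ++ [z]).length : Int) - 1 = ((zs.length : Nat) : Int) := by simp
        rw [this, PySem.List.pyGetD_natCast]
        simp
      rw [hzip, List.foldl_append, hlast]
      simp only [List.foldl_cons, List.foldl_nil]
      rw [List.sum_append]
      by_cases hx : x = 13
      · subst hx
        simp [bStep]
        ring
      · rw [if_neg hx]
        by_cases hz : z = 13
        · rw [if_pos ⟨hposn, hz⟩]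
          simp only [bStep, hz, hx, ne_eq, not_false_iff, and_self, if_true]
          simp
          ring
        · rw [if_neg (by tauto)]
          simp only [bStep, hz, false_and, if_false]
          simp [hx]
          ring

-- ===== VERDICT (by name: the statement is the Claim_ definition above) =====
theorem sum13_spec : Claim_equal_sum13 := by
  intro nums _
  unfold Spec_sum13 sum13 sum13_alt
  rw [PySem.List.slice_from_one, PySem.List.count_eq]
  by_cases h : nums = []
  · subst h; simp
  · rw [if_neg h]
    exact key nums
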